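-- pv_equiv track=rewrite | github.com/LeeJS9856/Algorithm | 프로그래머스/0/181876. 소문자로 바꾸기/소문자로 바꾸기.py | solution
-- ===== SOURCE A (Python) =====
-- def solution(myString):
--     answer = ''
--     for i in range(len(myString)):
--         if ord('A') <= ord(myString[i]) <= ord('Z'):
--             answer += chr(ord(myString[i])+ord('a')-ord('A'))
--         else:
--             answer += myString[i]
--     return answer
-- ===== SOURCE B (Python) =====
-- _LOWER_TABLE = str.maketrans('ABCDEFGHIJKLMNOPQRSTUVWXYZ',
--                              'abcdefghijklmnopqrstuvwxyz')
--
--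
-- def solution(myString):
--     return myString.translate(_LOWER_TABLE)
-- ===== Notes on version B (the rewrite author's own statement) =====
-- stated objective: idiomatic
-- what changed: Replaces the per-character ord()-arithmetic-and-branch loop with quadratic string concatenation by a precomputed str.maketrans translation table applied in one translate() call.
import Mathlib
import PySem

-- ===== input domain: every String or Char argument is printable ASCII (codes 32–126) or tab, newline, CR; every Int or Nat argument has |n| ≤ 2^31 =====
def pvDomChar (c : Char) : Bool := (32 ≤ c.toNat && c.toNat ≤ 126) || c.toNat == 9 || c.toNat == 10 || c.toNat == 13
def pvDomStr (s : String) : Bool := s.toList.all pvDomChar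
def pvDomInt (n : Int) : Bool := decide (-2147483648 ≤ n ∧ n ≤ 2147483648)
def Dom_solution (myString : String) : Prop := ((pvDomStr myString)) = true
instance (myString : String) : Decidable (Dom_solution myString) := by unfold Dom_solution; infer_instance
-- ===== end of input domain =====

-- B lowercases via a precomputed 26-entry translation table applied in one pass,
-- replacing A's per-character ord-arithmetic branch loop with string concatenation.


-- ===== PORT A =====
-- for i in range(len(myString)): branch on ord('A') ≤ ord(c) ≤ ord('Z'), append chr(ord(c)+32) or c
def solution (myString : String) : String :=
  String.ofList ((PySem.List.pyRange 0 (PySem.Str.len myString) 1).foldl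
    (fun answer i =>
      let c := PySem.List.pyGetD myString.toList i ' '
      if 65 ≤ c.toNat ∧ c.toNat ≤ 90 then
        answer ++ [Char.ofNat (c.toNat + 97 - 65)]
      else
        answer ++ [c]) [])

-- ===== PORT B =====
-- the str.maketrans table: 26 uppercase → lowercase pairs
def lowerTable : List (Char × Char) :=
  [('A','a'),('B','b'),('C','c'),('D','d'),('E','e'),('F','f'),('G','g'),
   ('H','h'),('I','i'),('J','j'),('K','k'),('L','l'),('M','m'),('N','n'),
   ('O','o'),('P','p'),('Q','q'),('R','r'),('S','s'),('T','t'),('U','u'),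
   ('V','v'),('W','w'),('X','x'),('Y','y'),('Z','z')]

-- str.translate: map each char through the table, chars without an entry pass through
def translateChar (c : Char) : Char :=
  match lowerTable.find? (fun p => p.1 == c) with
  | some p => p.2
  | none => c

def solution_alt (myString : String) : String :=
  String.ofList (myString.toList.map translateChar)

-- ===== PRECONDITION & SPEC =====
def Spec_solution (myString : String) (out : String) : Prop := out = solution_alt myString
instance (myString : String) (out : String) : Decidable (Spec_solution myString out) := by unfold Spec_solution; infer_instance

-- ===== CLAIM (what is proved, stated in full; the proofs are below) =====
def Claim_equal_solution : Prop := ∀ (myString : String), Dom_solution myString → Spec_solution myString (solution myString)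

-- ===== LEMMAS AND PROOFS =====

-- per-character agreement of A's branch with B's table lookup, on domain characters
theorem translateChar_eq (c : Char) (h : pvDomChar c = true) :
    (if 65 ≤ c.toNat ∧ c.toNat ≤ 90 then Char.ofNat (c.toNat + 97 - 65) else c)
      = translateChar c := by
  have hle : c.toNat ≤ 126 := by
    simp only [pvDomChar, Bool.or_eq_true, Bool.and_eq_true, decide_eq_true_eq,
      beq_iff_eq] at h
    omega
  have hc : Char.ofNat c.toNat = c := Char.ofNat_toNat c
  rw [← hc]
  generalize c.toNat = n at hle ⊢
  interval_cases n <;> decide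

theorem solution_spec : Claim_equal_solution := by
  intro s hdom
  unfold Spec_solution solution solution_alt
  have hlen : PySem.Str.len s = PySem.List.len s.toList := by
    simp [PySem.Str.len_eq, PySem.List.len_eq]
  rw [hlen]
  have hfun : (fun (answer : List Char) (i : Int) =>
      let c := PySem.List.pyGetD s.toList i ' '
      if 65 ≤ c.toNat ∧ c.toNat ≤ 90 then
        answer ++ [Char.ofNat (c.toNat + 97 - 65)]
      else answer ++ [c])
    = (fun answer i => answer ++
        [if 65 ≤ (PySem.List.pyGetD s.toList i ' ').toNat ∧
             (PySem.List.pyGetD s.toList i ' ').toNat ≤ 90 then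
           Char.ofNat ((PySem.List.pyGetD s.toList i ' ').toNat + 97 - 65)
         else PySem.List.pyGetD s.toList i ' ']) := by
    funext a i
    by_cases h : 65 ≤ (PySem.List.pyGetD s.toList i ' ').toNat ∧
        (PySem.List.pyGetD s.toList i ' ').toNat ≤ 90 <;> simp [h]
  rw [hfun, PySem.List.foldl_append_singleton_eq_map]
  simp only [List.nil_append]
  congr 1
  have := PySem.List.map_pyGetD_pyRange_zero s.toList ' '
  calc List.map _ (PySem.List.pyRange 0 (PySem.List.len s.toList) 1)
      = List.map (fun c => if 65 ≤ c.toNat ∧ c.toNat ≤ 90 then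
            Char.ofNat (c.toNat + 97 - 65) else c)
          (List.map (fun j => PySem.List.pyGetD s.toList j ' ')
            (PySem.List.pyRange 0 (PySem.List.len s.toList) 1)) := by
        simp [List.map_map, Function.comp_def]
    _ = List.map translateChar s.toList := by
        rw [PySem.List.map_pyGetD_pyRange_zero]
        apply List.map_congr_left
        intro c hc
        have : pvDomChar c = true := by
          unfold Dom_solution pvDomStr at hdom
          exact List.all_eq_true.mp hdom c hc
        exact translateChar_eq c this
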